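-- pv_equiv track=rewrite | github.com/mpindaro/event2vec | simpy_dataset_9000/events1_sign.py | get_part_b_xy
-- ===== SOURCE A (Python) =====
-- def get_part_b_xy(partA, minT, maxT):
--     intervals = []
--     if len(partA) != 0:
--         start = minT
--         for item in partA:
--             end = item[0] - 1
--             intervals.append((start, end))
--             start = item[1] + 1
--         intervals.append((start, maxT))
--         return intervals
--     else:
--         return [(minT, maxT)]
-- ===== SOURCE B (Python) =====
-- def get_part_b_xy(partA, minT, maxT):
--     if not partA:
--         return [(minT, maxT)]
--     head = partA[0]
--     return [(minT, head[0] - 1)] + get_part_b_xy(partA[1:], head[1] + 1, maxT)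
-- ===== Notes on version B (the rewrite author's own statement) =====
-- stated objective: alternative
-- what changed: Replaces A's single stateful loop threading a running start with a recursive decomposition: emit the gap before the head interval and recurse on the tail with minT rebound to head end + 1.
import Mathlib
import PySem

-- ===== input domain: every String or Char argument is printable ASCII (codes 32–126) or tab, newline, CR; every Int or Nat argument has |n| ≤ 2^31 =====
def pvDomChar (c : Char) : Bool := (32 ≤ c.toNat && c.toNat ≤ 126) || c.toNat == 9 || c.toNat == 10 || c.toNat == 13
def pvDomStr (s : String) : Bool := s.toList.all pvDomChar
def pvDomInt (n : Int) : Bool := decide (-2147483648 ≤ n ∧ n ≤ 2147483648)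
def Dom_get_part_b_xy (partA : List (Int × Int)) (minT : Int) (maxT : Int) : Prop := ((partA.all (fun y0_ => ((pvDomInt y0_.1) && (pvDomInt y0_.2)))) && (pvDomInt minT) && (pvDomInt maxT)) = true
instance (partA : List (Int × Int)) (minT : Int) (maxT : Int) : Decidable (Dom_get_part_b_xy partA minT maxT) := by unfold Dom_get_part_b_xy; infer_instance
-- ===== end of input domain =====

-- B replaces A's stateful accumulator loop with a recursive decomposition (gap before the head, recurse on the tail with a rebound lower bound); same cost, different structure.
-- ===== PORT A =====
def get_part_b_xy (partA : List (Int × Int)) (minT : Int) (maxT : Int) : List (Int × Int) :=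
  if partA.length ≠ 0 then
    let r := partA.foldl
      (fun (acc : List (Int × Int) × Int) item =>
        (acc.1 ++ [(acc.2, item.1 - 1)], item.2 + 1))
      ([], minT)
    r.1 ++ [(r.2, maxT)]
  else [(minT, maxT)]

-- ===== PORT B =====
def get_part_b_xy_alt (partA : List (Int × Int)) (minT : Int) (maxT : Int) : List (Int × Int) :=
  match partA with
  | [] => [(minT, maxT)]
  | head :: t => [(minT, head.1 - 1)] ++ get_part_b_xy_alt t (head.2 + 1) maxT

-- ===== PRECONDITION & SPEC =====
def Spec_get_part_b_xy (partA : List (Int × Int)) (minT : Int) (maxT : Int) (out : List (Int × Int)) : Prop := out = get_part_b_xy_alt partA minT maxT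
instance (partA : List (Int × Int)) (minT : Int) (maxT : Int) (out : List (Int × Int)) : Decidable (Spec_get_part_b_xy partA minT maxT out) := by unfold Spec_get_part_b_xy; infer_instance

-- ===== CLAIM =====
def Claim_equal_get_part_b_xy : Prop := ∀ (partA : List (Int × Int)) (minT : Int) (maxT : Int), Dom_get_part_b_xy partA minT maxT → Spec_get_part_b_xy partA minT maxT (get_part_b_xy partA minT maxT)

-- ===== LEMMAS AND PROOFS =====
lemma foldl_rec (l : List (Int × Int)) :
    ∀ (acc : List (Int × Int)) (s maxT : Int),
    (let r := l.foldl
        (fun (acc : List (Int × Int) × Int) item =>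
          (acc.1 ++ [(acc.2, item.1 - 1)], item.2 + 1)) (acc, s)
     r.1 ++ [(r.2, maxT)])
    = acc ++ get_part_b_xy_alt l s maxT := by
  induction l with
  | nil => intro acc s maxT; simp [get_part_b_xy_alt]
  | cons p t ih =>
      intro acc s maxT
      simp only [List.foldl_cons, get_part_b_xy_alt]
      rw [ih]
      simp

-- ===== VERDICT =====
theorem get_part_b_xy_spec : Claim_equal_get_part_b_xy := by
  intro partA minT maxT _
  unfold Spec_get_part_b_xy get_part_b_xy
  cases partA with
  | nil => simp [get_part_b_xy_alt]
  | cons p t =>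
      rw [if_pos (by simp)]
      have := foldl_rec (p :: t) [] minT maxT
      simpa using this
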